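-- pv_equiv track=rewrite | github.com/NoamAriel/bioinformatic_silk | libraries/amino_acid_group_motifs.py | count_group_motifs_with_lengths
-- ===== SOURCE A (Python) =====
-- from typing import Any, Dict, Iterable, List, Mapping, Optional, Sequence, Tuple
--
-- def count_group_motifs_with_lengths(
--     labels: Sequence[str],
--     min_length: int | None,
--     max_length: int | None,
--     unknown_label: str = "unknown",
--     skip_unknown: bool = True,
--     labels_str: str | None = None,
--     label_offsets: Sequence[int] | None = None,
-- ) -> Tuple[Dict[str, int], Dict[str, int]]:
--     if min_length is None or max_length is None:
--         return {}, {}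
--     if min_length < 1 or max_length < min_length:
--         raise ValueError("Invalid motif length range.")
--
--     counts: Dict[str, int] = {}
--     lengths: Dict[str, int] = {}
--     L = len(labels)
--     unknown_prefix = _build_unknown_prefix(labels, unknown_label) if skip_unknown else None
--     if labels_str is None or label_offsets is None:
--         labels_str = "".join(labels)
--         label_offsets = _build_label_offsets(labels)
--     for n in range(min_length, max_length + 1):
--         if n > L:
--             break
--         for i in range(L - n + 1):
--             if skip_unknown and unknown_prefix and (unknown_prefix[i + n] - unknown_prefix[i]) > 0:
--                 continue
--             motif = labels_str[label_offsets[i] : label_offsets[i + n]]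
--             counts[motif] = counts.get(motif, 0) + 1
--             if motif not in lengths:
--                 lengths[motif] = n
--     return counts, lengths
--
-- def _build_unknown_prefix(labels: Sequence[str], unknown_label: str) -> List[int]:
--     prefix = [0] * (len(labels) + 1)
--     for idx, label in enumerate(labels):
--         prefix[idx + 1] = prefix[idx] + (1 if label == unknown_label else 0)
--     return prefix
--
-- def _build_label_offsets(labels: Sequence[str]) -> List[int]:
--     offsets = [0] * (len(labels) + 1)
--     total = 0
--     for idx, label in enumerate(labels):
--         total += len(label)
--         offsets[idx + 1] = total
--     return offsets
-- ===== SOURCE B (Python) =====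
-- def count_group_motifs_with_lengths(
--     labels,
--     min_length,
--     max_length,
--     unknown_label="unknown",
--     skip_unknown=True,
--     labels_str=None,
--     label_offsets=None,
-- ):
--     if min_length is None or max_length is None:
--         return {}, {}
--     if min_length < 1 or max_length < min_length:
--         raise ValueError("Invalid motif length range.")
--     if labels_str is None or label_offsets is None:
--         labels_str = "".join(labels)
--         offsets = [0]
--         for label in labels:
--             offsets.append(offsets[-1] + len(label))
--         label_offsets = offsets
--     L = len(labels)
--     events = [
--         (labels_str[label_offsets[i] : label_offsets[i + n]], n)
--         for n in range(min_length, min(max_length, L) + 1)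
--         for i in range(L - n + 1)
--         if not (skip_unknown and unknown_label in labels[i : i + n])
--     ]
--     counts = {}
--     for motif, _ in events:
--         counts[motif] = counts.get(motif, 0) + 1
--     lengths = {}
--     for motif, n in events:
--         lengths.setdefault(motif, n)
--     return counts, lengths
-- ===== Notes on version B (the rewrite author's own statement) =====
-- stated objective: simpler
-- what changed: Dropped the _build_unknown_prefix prefix-sum table in favour of a direct `unknown_label in labels[i:i+n]` window test, capped the outer range with min(max_length, L) instead of a break, and split the interleaved dict updates into a generate-all-(motif,n)-events comprehension followed by two separate aggregation passes (a counting pass and a setdefault pass).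
-- outside the precondition, e.g. on count_group_motifs_with_lengths(['unknown'], 1, 1, 'unknown', True, 'x', []): A returns ({}, {}), B returns ({}, {})
import Mathlib
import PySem

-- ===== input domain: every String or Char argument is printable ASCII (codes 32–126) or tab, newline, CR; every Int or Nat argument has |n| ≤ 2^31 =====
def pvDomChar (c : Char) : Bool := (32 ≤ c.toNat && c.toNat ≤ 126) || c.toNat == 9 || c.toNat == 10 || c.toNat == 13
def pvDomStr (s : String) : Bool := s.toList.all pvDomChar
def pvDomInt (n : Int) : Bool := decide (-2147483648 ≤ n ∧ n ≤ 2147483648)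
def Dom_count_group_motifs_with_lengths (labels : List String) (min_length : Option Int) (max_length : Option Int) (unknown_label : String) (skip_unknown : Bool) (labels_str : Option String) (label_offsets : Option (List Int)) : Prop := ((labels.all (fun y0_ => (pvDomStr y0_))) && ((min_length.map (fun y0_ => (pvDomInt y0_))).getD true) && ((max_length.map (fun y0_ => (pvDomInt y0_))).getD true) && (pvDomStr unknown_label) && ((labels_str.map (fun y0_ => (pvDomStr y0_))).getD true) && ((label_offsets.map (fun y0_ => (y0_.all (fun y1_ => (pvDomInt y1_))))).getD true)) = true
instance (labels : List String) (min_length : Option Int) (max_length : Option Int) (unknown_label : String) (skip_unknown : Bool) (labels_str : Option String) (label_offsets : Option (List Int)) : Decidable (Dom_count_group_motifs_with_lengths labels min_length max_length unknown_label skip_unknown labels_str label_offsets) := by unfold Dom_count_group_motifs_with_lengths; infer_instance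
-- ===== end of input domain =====

-- ===== PORT A =====
-- B replaces A's prefix-sum unknown table with a direct window membership test and a
-- generate-events-then-aggregate decomposition (objective: simpler); same return values.
def pvBuildUnknownPrefix (labels : List String) (unknown_label : String) : List Int :=
  labels.foldl (fun prefx label =>
    prefx ++ [PySem.List.pyGetD prefx (-1) 0 + (if label == unknown_label then 1 else 0)]) [0]

def pvBuildLabelOffsets (labels : List String) : List Int :=
  (labels.foldl (fun (st : List Int × Int) label =>
      let total := st.2 + (PySem.Str.len label : Int)
      (st.1 ++ [total], total)) ([0], 0)).1

-- the 'for n in range(min_length, max_length + 1): if n > L: break' loop, fuel = remaining iterations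
def pvLoopA {St : Type} (step : Int → St → St) (L : Int) : Nat → Int → St → St
  | 0, _, st => st
  | f+1, n, st => if L < n then st else pvLoopA step L f (n+1) (step n st)

-- body of A after the None-check: the guarded counting loop
def pvRunA (labels : List String) (mn mx : Int) (unknown_label : String) (skip_unknown : Bool) (labels_str : Option String) (label_offsets : Option (List Int)) : (List (String × Int)) × (List (String × Int)) :=
  if mn < 1 || mx < mn then ([], [])  -- Python raises ValueError here; excluded by Pre_
  else
    let L : Int := (labels.length : Int)
    let unknown_prefix : Option (List Int) :=
      if skip_unknown then some (pvBuildUnknownPrefix labels unknown_label) else none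
    let sp : String × List Int :=
      match labels_str, label_offsets with
      | some s, some o => (s, o)
      | _, _ => (PySem.Str.join "" labels, pvBuildLabelOffsets labels)
    let step : Int → (PySem.Dict String Int × PySem.Dict String Int) → (PySem.Dict String Int × PySem.Dict String Int) := fun n st =>
      (PySem.List.pyRange 0 (L - n + 1) 1).foldl (fun st i =>
        if skip_unknown &&
           (unknown_prefix.elim false (fun up => !up.isEmpty && decide (0 < PySem.List.pyGetD up (i + n) 0 - PySem.List.pyGetD up i 0))) then st
        else
          let motif := PySem.Str.slice sp.1 (some (PySem.List.pyGetD sp.2 i 0)) (some (PySem.List.pyGetD sp.2 (i + n) 0))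
          (st.1.insert motif (st.1.getD motif 0 + 1),
           if st.2.contains motif then st.2 else st.2.insert motif n)) st
    let res := pvLoopA step L ((mx + 1 - mn).toNat) mn (PySem.Dict.empty, PySem.Dict.empty)
    (res.1.items, res.2.items)

def count_group_motifs_with_lengths (labels : List String) (min_length : Option Int) (max_length : Option Int) (unknown_label : String) (skip_unknown : Bool) (labels_str : Option String) (label_offsets : Option (List Int)) : (List (String × Int)) × (List (String × Int)) :=
  match min_length, max_length with
  | none, _ => ([], [])
  | some _, none => ([], [])
  | some mn, some mx => pvRunA labels mn mx unknown_label skip_unknown labels_str label_offsets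

-- ===== PORT B =====
-- body of B after the None-check: events comprehension, then two aggregation passes
def pvRunB (labels : List String) (mn mx : Int) (unknown_label : String) (skip_unknown : Bool) (labels_str : Option String) (label_offsets : Option (List Int)) : (List (String × Int)) × (List (String × Int)) :=
  if mn < 1 || mx < mn then ([], [])  -- Python raises ValueError here; excluded by Pre_
  else
    let sp : String × List Int :=
      match labels_str, label_offsets with
      | some s, some o => (s, o)
      | _, _ => (PySem.Str.join "" labels,
          labels.foldl (fun offs label =>
            offs ++ [PySem.List.pyGetD offs (-1) 0 + (PySem.Str.len label : Int)]) [0])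
    let L : Int := (labels.length : Int)
    let events : List (String × Int) :=
      (PySem.List.pyRange mn (min mx L + 1) 1).flatMap (fun n =>
        ((PySem.List.pyRange 0 (L - n + 1) 1).filter (fun i =>
            !(skip_unknown && (PySem.List.slice labels (some i) (some (i + n))).contains unknown_label))).map
          (fun i => (PySem.Str.slice sp.1 (some (PySem.List.pyGetD sp.2 i 0)) (some (PySem.List.pyGetD sp.2 (i + n) 0)), n)))
    let counts := events.foldl (fun d p => d.insert p.1 (d.getD p.1 0 + 1)) (PySem.Dict.empty : PySem.Dict String Int)
    let lengths := events.foldl (fun d p => d.setdefault p.1 p.2) (PySem.Dict.empty : PySem.Dict String Int)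
    (counts.items, lengths.items)

def count_group_motifs_with_lengths_alt (labels : List String) (min_length : Option Int) (max_length : Option Int) (unknown_label : String) (skip_unknown : Bool) (labels_str : Option String) (label_offsets : Option (List Int)) : (List (String × Int)) × (List (String × Int)) :=
  match min_length, max_length with
  | none, _ => ([], [])
  | some _, none => ([], [])
  | some mn, some mx => pvRunB labels mn mx unknown_label skip_unknown labels_str label_offsets

-- ===== PRECONDITION & SPEC =====
-- Pre_ excludes the ranges on which A raises ValueError (min_length < 1 or max_length < min_length) and,
-- when both labels_str and label_offsets are supplied and windows are scanned, a label_offsets shorter than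
-- len(labels)+1, on which A in general raises IndexError (on such inputs where every window happens to
-- contain unknown_label A still returns empty dicts, and so does B).
def Pre_count_group_motifs_with_lengths (labels : List String) (min_length : Option Int) (max_length : Option Int) (unknown_label : String) (skip_unknown : Bool) (labels_str : Option String) (label_offsets : Option (List Int)) : Prop :=
  (min_length = none ∨ max_length = none) ∨
  (1 ≤ min_length.getD 0 ∧ min_length.getD 0 ≤ max_length.getD 0 ∧
   (labels_str = none ∨ label_offsets = none ∨
    (labels.length : Int) < min_length.getD 0 ∨
    (labels.length : Int) < ((label_offsets.getD []).length : Int)))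
instance (labels : List String) (min_length : Option Int) (max_length : Option Int) (unknown_label : String) (skip_unknown : Bool) (labels_str : Option String) (label_offsets : Option (List Int)) : Decidable (Pre_count_group_motifs_with_lengths labels min_length max_length unknown_label skip_unknown labels_str label_offsets) := by unfold Pre_count_group_motifs_with_lengths; infer_instance

def pvWitness_count_group_motifs_with_lengths : List String × Option Int × Option Int × String × Bool × Option String × Option (List Int) :=
  (["h", "p", "unknown", "h"], some 1, some 2, "unknown", true, none, none)

def Spec_count_group_motifs_with_lengths (labels : List String) (min_length : Option Int) (max_length : Option Int) (unknown_label : String) (skip_unknown : Bool) (labels_str : Option String) (label_offsets : Option (List Int)) (out : (List (String × Int)) × (List (String × Int))) : Prop := out = count_group_motifs_with_lengths_alt labels min_length max_length unknown_label skip_unknown labels_str label_offsets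
instance (labels : List String) (min_length : Option Int) (max_length : Option Int) (unknown_label : String) (skip_unknown : Bool) (labels_str : Option String) (label_offsets : Option (List Int)) (out : (List (String × Int)) × (List (String × Int))) : Decidable (Spec_count_group_motifs_with_lengths labels min_length max_length unknown_label skip_unknown labels_str label_offsets out) := by unfold Spec_count_group_motifs_with_lengths; infer_instance

-- ===== CLAIM (what is proved, stated in full; the proofs are below) =====
def Claim_equal_count_group_motifs_with_lengths : Prop := ∀ (labels : List String) (min_length : Option Int) (max_length : Option Int) (unknown_label : String) (skip_unknown : Bool) (labels_str : Option String) (label_offsets : Option (List Int)), Dom_count_group_motifs_with_lengths labels min_length max_length unknown_label skip_unknown labels_str label_offsets → Pre_count_group_motifs_with_lengths labels min_length max_length unknown_label skip_unknown labels_str label_offsets → Spec_count_group_motifs_with_lengths labels min_length max_length unknown_label skip_unknown labels_str label_offsets (count_group_motifs_with_lengths labels min_length max_length unknown_label skip_unknown labels_str label_offsets)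

-- ===== LEMMAS AND PROOFS =====

theorem pv_foldl_skip {α St : Type} (l : List α) (c : α → Bool) (u : St → α → St) (st : St) :
    l.foldl (fun st x => if c x then st else u st x) st = (l.filter (fun x => !c x)).foldl u st := by
  induction l generalizing st with
  | nil => rfl
  | cons x xs ih =>
    by_cases h : c x <;> simp [List.filter_cons, h, ih]

theorem pv_foldl_flatMap {α β St : Type} (l : List α) (g : α → List β) (f : St → β → St) (st : St) :
    (l.flatMap g).foldl f st = l.foldl (fun st x => (g x).foldl f st) st := by
  induction l generalizing st with
  | nil => rfl
  | cons x xs ih => simp [List.flatMap_cons, List.foldl_append, ih]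

theorem pv_foldl_pair {α S1 S2 : Type} (l : List α) (f1 : S1 → α → S1) (f2 : S2 → α → S2) (a : S1) (b : S2) :
    l.foldl (fun (st : S1 × S2) x => (f1 st.1 x, f2 st.2 x)) (a, b) = (l.foldl f1 a, l.foldl f2 b) := by
  induction l generalizing a b with
  | nil => rfl
  | cons x xs ih => simp [List.foldl_cons, ih]

theorem pv_off_eq (ls : List String) (acc : List Int) (total : Int)
    (h : PySem.List.pyGetD acc (-1) 0 = total) :
    (ls.foldl (fun (st : List Int × Int) label =>
        let t := st.2 + (PySem.Str.len label : Int)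
        (st.1 ++ [t], t)) (acc, total)).1
    = ls.foldl (fun offs label =>
        offs ++ [PySem.List.pyGetD offs (-1) 0 + (PySem.Str.len label : Int)]) acc := by
  induction ls generalizing acc total with
  | nil => rfl
  | cons x xs ih =>
    simp only [List.foldl_cons, h]
    exact ih _ _ (by rw [PySem.List.pyGetD_neg_one_append_singleton])

theorem pv_loop_eq {St : Type} (step : Int → St → St) (L mx : Int) :
    ∀ (fuel : Nat) (n : Int) (st : St), fuel = (mx + 1 - n).toNat →
    pvLoopA step L fuel n st
      = (PySem.List.pyRange n (min mx L + 1) 1).foldl (fun st nn => step nn st) st := by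
  intro fuel
  induction fuel with
  | zero =>
    intro n st h
    rw [PySem.List.pyRange_one_eq_nil (by omega)]
    rfl
  | succ f ih =>
    intro n st h
    have hn : n ≤ mx := by omega
    simp only [pvLoopA]
    by_cases hL : L < n
    · rw [if_pos hL, PySem.List.pyRange_one_eq_nil (by omega)]
      rfl
    · rw [if_neg hL, PySem.List.pyRange_one_cons (by omega), List.foldl_cons]
      exact ih (n+1) (step n st) (by omega)

theorem pv_prefix_eq (ls : List String) (u : String) :
    pvBuildUnknownPrefix ls u
      = (List.range (ls.length+1)).map (fun k => (((ls.take k).countP (fun l => l == u)) : Int)) := by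
  induction ls using List.reverseRecOn with
  | nil => simp [pvBuildUnknownPrefix]
  | append_singleton ys y ih =>
    unfold pvBuildUnknownPrefix at ih ⊢
    rw [List.foldl_append, ih]
    have hlast : PySem.List.pyGetD ((List.range (ys.length+1)).map
        (fun k => (((ys.take k).countP (fun l => l == u)) : Int))) (-1) 0
        = ((ys.countP (fun l => l == u)) : Int) := by
      rw [List.range_succ, List.map_append]
      simp only [List.map_cons, List.map_nil]
      rw [PySem.List.pyGetD_neg_one_append_singleton]
      simp
    simp only [List.foldl_cons, List.foldl_nil, hlast]
    rw [List.length_append, List.length_singleton, List.range_succ (n := ys.length + 1), List.map_append]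
    congr 1
    · apply List.map_congr_left
      intro k hk
      rw [List.mem_range] at hk
      rw [List.take_append_of_le_length (by omega)]
    · simp only [List.map_cons, List.map_nil, List.cons.injEq, and_true]
      rw [List.take_of_length_le (by simp), List.countP_append]
      simp [List.countP_cons]

theorem pv_skip_eq (ls : List String) (u : String) (n i : Int)
    (hi : 0 ≤ i) (hn : 0 ≤ n) (hin : i + n ≤ (ls.length : Int)) :
    (!(pvBuildUnknownPrefix ls u).isEmpty &&
      decide (0 < PySem.List.pyGetD (pvBuildUnknownPrefix ls u) (i + n) 0
              - PySem.List.pyGetD (pvBuildUnknownPrefix ls u) i 0))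
    = (PySem.List.slice ls (some i) (some (i + n))).contains u := by
  obtain ⟨a, rfl⟩ : ∃ a : Nat, i = (a : Int) := ⟨i.toNat, by omega⟩
  obtain ⟨b, rfl⟩ : ∃ b : Nat, n = (b : Int) := ⟨n.toNat, by omega⟩
  rw [pv_prefix_eq]
  have hcast : (a : Int) + (b : Int) = ((a + b : Nat) : Int) := by push_cast; ring
  rw [hcast, PySem.List.pyGetD_natCast, PySem.List.pyGetD_natCast,
      PySem.List.slice_natCast]
  have hab : a + b ≤ ls.length := by omega
  have hget : ∀ (k : Nat), k ≤ ls.length →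
      (List.map (fun k => (((ls.take k).countP (fun l => l == u)) : Int))
        (List.range (ls.length + 1))).getD k 0
      = (((ls.take k).countP (fun l => l == u)) : Int) := by
    intro k hk
    rw [List.getD_eq_getElem?_getD, List.getElem?_map, List.getElem?_range (by omega)]
    rfl
  rw [hget _ hab, hget _ (by omega)]
  have hne : ¬ (List.map (fun k => (((ls.take k).countP (fun l => l == u)) : Int))
      (List.range (ls.length + 1))).isEmpty := by
    simp
  rw [List.take_add, List.countP_append]
  have hcb : ((ls.drop a).take b).contains u
      = decide (0 < ((ls.drop a).take b).countP (fun l => l == u)) := by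
    by_cases hm : u ∈ (ls.drop a).take b
    · have hp : 0 < ((ls.drop a).take b).countP (fun l => l == u) :=
        List.countP_pos_iff.mpr ⟨u, hm, by simp⟩
      simp [hm, hp]
    · have hz : ((ls.drop a).take b).countP (fun l => l == u) = 0 := by
        rw [List.countP_eq_zero]
        intro x hx
        simp only [beq_iff_eq]
        rintro rfl
        exact hm hx
      simp [hm, hz]
  rw [Nat.add_sub_cancel_left, hcb]
  simp only [Bool.not_eq_true] at hne
  rw [hne]
  simp only [Bool.not_false, Bool.true_and, decide_eq_decide]
  push_cast
  omega

theorem pv_joint (L mn mx : Int) (g : Int → Int → String) (cA cB : Int → Int → Bool)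
    (hc : ∀ n, mn ≤ n → n < min mx L + 1 → ∀ i, 0 ≤ i → i < L - n + 1 → cA n i = cB n i) :
    pvLoopA (fun n st => (PySem.List.pyRange 0 (L - n + 1) 1).foldl
        (fun (st : PySem.Dict String Int × PySem.Dict String Int) i =>
          if cA n i then st
          else (st.1.insert (g i n) (st.1.getD (g i n) 0 + 1),
                if st.2.contains (g i n) then st.2 else st.2.insert (g i n) n)) st)
      L ((mx + 1 - mn).toNat) mn (PySem.Dict.empty, PySem.Dict.empty)
    = (((PySem.List.pyRange mn (min mx L + 1) 1).flatMap (fun n =>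
          ((PySem.List.pyRange 0 (L - n + 1) 1).filter (fun i => !cB n i)).map (fun i => (g i n, n)))).foldl
          (fun d p => d.insert p.1 (d.getD p.1 0 + 1)) PySem.Dict.empty,
       ((PySem.List.pyRange mn (min mx L + 1) 1).flatMap (fun n =>
          ((PySem.List.pyRange 0 (L - n + 1) 1).filter (fun i => !cB n i)).map (fun i => (g i n, n)))).foldl
          (fun d p => d.setdefault p.1 p.2) PySem.Dict.empty) := by
  have hset : (fun (d : PySem.Dict String Int) (p : String × Int) => d.setdefault p.1 p.2)
      = (fun (d : PySem.Dict String Int) (p : String × Int) =>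
          if d.contains p.1 then d else d.insert p.1 p.2) := by
    funext d p
    by_cases h : d.contains p.1
    · simp [PySem.Dict.setdefault_of_contains, h]
    · simp [PySem.Dict.setdefault_of_not_contains, h]
  rw [hset, ← pv_foldl_pair, pv_foldl_flatMap,
      pv_loop_eq _ L mx ((mx + 1 - mn).toNat) mn _ rfl]
  apply PySem.List.foldl_congr_mem
  intro st n hn
  rw [PySem.List.mem_pyRange_one] at hn
  rw [pv_foldl_skip, List.foldl_map]
  have hfil : (PySem.List.pyRange 0 (L - n + 1) 1).filter (fun i => !cA n i)
      = (PySem.List.pyRange 0 (L - n + 1) 1).filter (fun i => !cB n i) := by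
    apply List.filter_congr
    intro i hi
    rw [PySem.List.mem_pyRange_one] at hi
    rw [hc n hn.1 hn.2 i hi.1 hi.2]
  rw [hfil]

theorem pv_cond_eq (labels : List String) (u : String) (sk : Bool) (mn mx : Int) (h1 : 1 ≤ mn) :
    ∀ n, mn ≤ n → n < min mx (labels.length : Int) + 1 → ∀ i, 0 ≤ i → i < (labels.length : Int) - n + 1 →
    (sk && ((if sk then some (pvBuildUnknownPrefix labels u) else none).elim false (fun up => !up.isEmpty && decide (0 < PySem.List.pyGetD up (i + n) 0 - PySem.List.pyGetD up i 0))))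
    = (sk && (PySem.List.slice labels (some i) (some (i + n))).contains u) := by
  intro n hn1 hn2 i hi1 hi2
  cases sk with
  | false => rfl
  | true =>
    simp only [if_pos, Bool.true_and]
    exact pv_skip_eq labels u n i hi1 (by omega) (by omega)

theorem pv_main (labels : List String) (u : String) (sk : Bool) (lstr : String) (offs : List Int)
    (mn mx : Int) (h1 : 1 ≤ mn) :
    pvLoopA (fun n st => (PySem.List.pyRange 0 ((labels.length : Int) - n + 1) 1).foldl
        (fun (st : PySem.Dict String Int × PySem.Dict String Int) i =>
          if sk && ((if sk then some (pvBuildUnknownPrefix labels u) else none).elim false (fun up => !up.isEmpty && decide (0 < PySem.List.pyGetD up (i + n) 0 - PySem.List.pyGetD up i 0))) then st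
          else
            (st.1.insert (PySem.Str.slice lstr (some (PySem.List.pyGetD offs i 0)) (some (PySem.List.pyGetD offs (i + n) 0)))
               (st.1.getD (PySem.Str.slice lstr (some (PySem.List.pyGetD offs i 0)) (some (PySem.List.pyGetD offs (i + n) 0))) 0 + 1),
             if st.2.contains (PySem.Str.slice lstr (some (PySem.List.pyGetD offs i 0)) (some (PySem.List.pyGetD offs (i + n) 0)))
             then st.2
             else st.2.insert (PySem.Str.slice lstr (some (PySem.List.pyGetD offs i 0)) (some (PySem.List.pyGetD offs (i + n) 0))) n)) st)
      (labels.length : Int) ((mx + 1 - mn).toNat) mn (PySem.Dict.empty, PySem.Dict.empty)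
    = (((PySem.List.pyRange mn (min mx (labels.length : Int) + 1) 1).flatMap (fun n =>
          ((PySem.List.pyRange 0 ((labels.length : Int) - n + 1) 1).filter (fun i =>
              !(sk && (PySem.List.slice labels (some i) (some (i + n))).contains u))).map
            (fun i => (PySem.Str.slice lstr (some (PySem.List.pyGetD offs i 0)) (some (PySem.List.pyGetD offs (i + n) 0)), n)))).foldl
          (fun d p => d.insert p.1 (d.getD p.1 0 + 1)) PySem.Dict.empty,
       ((PySem.List.pyRange mn (min mx (labels.length : Int) + 1) 1).flatMap (fun n =>
          ((PySem.List.pyRange 0 ((labels.length : Int) - n + 1) 1).filter (fun i =>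
              !(sk && (PySem.List.slice labels (some i) (some (i + n))).contains u))).map
            (fun i => (PySem.Str.slice lstr (some (PySem.List.pyGetD offs i 0)) (some (PySem.List.pyGetD offs (i + n) 0)), n)))).foldl
          (fun d p => d.setdefault p.1 p.2) PySem.Dict.empty) :=
  pv_joint (labels.length : Int) mn mx
    (fun i n => PySem.Str.slice lstr (some (PySem.List.pyGetD offs i 0)) (some (PySem.List.pyGetD offs (i + n) 0)))
    (fun n i => sk && ((if sk then some (pvBuildUnknownPrefix labels u) else none).elim false (fun up => !up.isEmpty && decide (0 < PySem.List.pyGetD up (i + n) 0 - PySem.List.pyGetD up i 0))))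
    (fun n i => sk && (PySem.List.slice labels (some i) (some (i + n))).contains u)
    (pv_cond_eq labels u sk mn mx h1)

-- ===== VERDICT (by name: the statement is the Claim_ definition above) =====
set_option maxHeartbeats 2000000 in
theorem pv_run_eq (labels : List String) (u : String) (sk : Bool) (lstr? : Option String)
    (offs? : Option (List Int)) (mn mx : Int) (h1 : 1 ≤ mn) (h2 : mn ≤ mx) :
    pvRunA labels mn mx u sk lstr? offs? = pvRunB labels mn mx u sk lstr? offs? := by
  unfold pvRunA pvRunB
  have hguard : ¬ ((decide (mn < 1) || decide (mx < mn)) = true) := by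
    simp only [Bool.or_eq_true, decide_eq_true_eq]
    omega
  rw [if_neg hguard, if_neg hguard]
  have hoff : pvBuildLabelOffsets labels
      = labels.foldl (fun offs label =>
          offs ++ [PySem.List.pyGetD offs (-1) 0 + (PySem.Str.len label : Int)]) [0] := by
    unfold pvBuildLabelOffsets
    exact pv_off_eq labels [0] 0 (by decide)
  rcases lstr? with _ | s <;> rcases offs? with _ | o <;>
    simp only [hoff] <;>
    exact congrArg (fun st => (Prod.fst st |>.items, Prod.snd st |>.items))
      (pv_main labels u sk _ _ mn mx h1)

-- ===== VERDICT (by name: the statement is the Claim_ definition above) =====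
theorem count_group_motifs_with_lengths_spec : Claim_equal_count_group_motifs_with_lengths := by
  unfold Claim_equal_count_group_motifs_with_lengths
  intro labels min_length max_length u sk lstr? offs? hdom hpre
  unfold Spec_count_group_motifs_with_lengths
  unfold Pre_count_group_motifs_with_lengths at hpre
  unfold count_group_motifs_with_lengths count_group_motifs_with_lengths_alt
  cases min_length with
  | none => rfl
  | some mn =>
    cases max_length with
    | none => rfl
    | some mx =>
      have hg : 1 ≤ mn ∧ mn ≤ mx := by
        rcases hpre with (h | h) | h
        · exact absurd h (by simp)
        · exact absurd h (by simp)
        · exact ⟨by simpa using h.1, by simpa using h.2.1⟩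
      exact pv_run_eq labels u sk lstr? offs? mn mx hg.1 hg.2
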